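-- pv_equiv track=rewrite | github.com/valisasu/SAT-comparison | comparison.py | dpll_solver
-- ===== SOURCE A (Python) =====
-- def dpll_solver(cnf, assignment=None):
--     """
--     DPLL with unit propagation and pure literal elimination.
--     Returns True if satisfiable, False if unsatisfiable.
--     """
--     if assignment is None:
--         assignment = {}
--     # Unit propagation
--     while True:
--         units = [c for c in cnf if len(c) == 1]
--         if not units:
--             break
--         l = next(iter(units[0]))
--         var, val = abs(l), (l > 0)
--         assignment[var] = val
--         new_cnf = []
--         for c in cnf:
--             if l in c:
--                 continue
--             if -l in c:
--                 reduced = frozenset(x for x in c if x != -l)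
--                 if not reduced:
--                     return False
--                 new_cnf.append(reduced)
--             else:
--                 new_cnf.append(c)
--         cnf = new_cnf
--
--     # Pure literal elimination
--     lits = {l for c in cnf for l in c}
--     pures = [l for l in lits if -l not in lits]
--     for l in pures:
--         var, val = abs(l), (l > 0)
--         assignment[var] = val
--         cnf = [c for c in cnf if l not in c]
--
--     if not cnf:
--         return True
--     if any(len(c) == 0 for c in cnf):
--         return False
--
--     # Branch on a literal
--     lit = next(iter(next(iter(cnf))))
--     var = abs(lit)
--     for val in (True, False):
--         branch_lit = var if val else -var
--         new_cnf = []
--         for c in cnf: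
--             if branch_lit in c:
--                 continue
--             if -branch_lit in c:
--                 reduced = frozenset(x for x in c if x != -branch_lit)
--                 new_cnf.append(reduced)
--             else:
--                 new_cnf.append(c)
--         if dpll_solver(new_cnf, dict(assignment)):
--             return True
--     return False
-- ===== SOURCE B (Python) =====
-- import itertools
--
--
-- def dpll_solver(cnf, assignment=None):
--     """
--     Exhaustive truth-table SAT check: enumerate all assignments over the
--     variables occurring in cnf and test whether some assignment satisfies
--     every clause (a literal l is satisfied iff value(abs(l)) == (l > 0)).
--     Note: unlike A, B never mutates a caller-provided `assignment` dict;
--     only the return value is claimed equal.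
--     """
--     variables = sorted({abs(l) for c in cnf for l in c})
--     for combo in itertools.product((False, True), repeat=len(variables)):
--         asg = dict(zip(variables, combo))
--         if all(any(asg[abs(l)] == (l > 0) for l in c) for c in cnf):
--             return True
--     return False
-- ===== Notes on version B (the rewrite author's own statement) =====
-- stated objective: simpler
-- what changed: Replaced the recursive DPLL procedure (unit propagation, pure-literal elimination, branching with clause rewriting) by a plain exhaustive truth-table search over all assignments of the occurring variables; also, B does not mutate a caller-provided assignment dict (the equivalence is about the return value).
import Mathlib
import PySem

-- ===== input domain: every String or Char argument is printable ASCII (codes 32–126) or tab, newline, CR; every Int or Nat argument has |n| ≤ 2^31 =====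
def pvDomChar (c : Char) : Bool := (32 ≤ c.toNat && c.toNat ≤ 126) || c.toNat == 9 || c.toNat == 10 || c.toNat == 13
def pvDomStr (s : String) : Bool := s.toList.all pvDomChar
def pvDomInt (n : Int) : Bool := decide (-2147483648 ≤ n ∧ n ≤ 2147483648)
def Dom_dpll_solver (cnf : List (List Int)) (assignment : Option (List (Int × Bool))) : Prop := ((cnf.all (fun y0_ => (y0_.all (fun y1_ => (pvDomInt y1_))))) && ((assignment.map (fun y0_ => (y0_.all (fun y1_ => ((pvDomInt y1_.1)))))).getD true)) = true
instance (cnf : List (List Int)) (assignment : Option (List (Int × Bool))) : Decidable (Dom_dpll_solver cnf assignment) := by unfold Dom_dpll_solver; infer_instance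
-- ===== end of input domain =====

-- B replaces A's recursive DPLL by a plain truth-table search over the occurring variables
-- (objective: simpler).  A mutates a caller-provided `assignment` dict as a side effect; B does
-- not — the equivalence proved here is about the RETURN value only.
-- Clauses are modelled as `List Int` throughout; Python's `frozenset(...)` clause is modelled as
-- the first-occurrence dedup of its elements (CPython's hash iteration order over a frozenset is
-- not modelled; it only influences which literal DPLL picks next, never the returned Bool, which
-- is proved below equal to satisfiability of the formula).

-- ===== PORT A =====

-- `frozenset(x for x in c if x != b)` (first-occurrence order)
def reduceClause (b : Int) (c : List Int) : List Int :=
  PySem.List.dedup (c.filter (fun x => decide (x ≠ b)))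

-- total number of literal occurrences: termination measure of the unit-propagation loop
def sumLen (cnf : List (List Int)) : Nat := (cnf.map List.length).sum

-- the set of variables occurring in cnf: termination measure of the DPLL branching recursion
def varsF (cnf : List (List Int)) : Finset Int := ((cnf.flatMap id).map (fun l => |l|)).toFinset

-- one pass of `for c in cnf: ...` inside the unit-propagation loop; `none` = `return False`
def reduceUnit (l : Int) : List (List Int) → Option (List (List Int))
  | [] => some []
  | c :: cs =>
    if l ∈ c then reduceUnit l cs
    else if -l ∈ c then
      if reduceClause (-l) c = [] then none
      else (reduceUnit l cs).map (reduceClause (-l) c :: ·)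
    else (reduceUnit l cs).map (c :: ·)

theorem mem_reduceClause (b : Int) (c : List Int) (y : Int) :
    y ∈ reduceClause b c ↔ y ∈ c ∧ y ≠ b := by
  unfold reduceClause
  rw [PySem.List.mem_dedup, List.mem_filter]
  simp

theorem reduceClause_length_le (b : Int) (c : List Int) :
    (reduceClause b c).length ≤ c.length := by
  unfold reduceClause
  have h2 : (c.filter (fun x => decide (x ≠ b))).length ≤ c.length :=
    List.length_filter_le _ c
  refine le_trans ?_ h2
  set xs := c.filter (fun x => decide (x ≠ b))
  calc (PySem.List.dedup xs).length = (PySem.List.dedup xs).toFinset.card :=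
        (List.toFinset_card_of_nodup (PySem.List.nodup_dedup xs)).symm
    _ ≤ xs.toFinset.card := Finset.card_le_card (by
        intro x hx; simp only [List.mem_toFinset] at *; exact (PySem.List.mem_dedup xs x).1 hx)
    _ ≤ xs.length := xs.toFinset_card_le

theorem reduceUnit_sumLen_le (l : Int) (cnf cnf' : List (List Int))
    (h : reduceUnit l cnf = some cnf') : sumLen cnf' ≤ sumLen cnf := by
  induction cnf generalizing cnf' with
  | nil =>
    simp only [reduceUnit, Option.some.injEq] at h
    subst h; exact le_refl _
  | cons c cs ih =>
    simp only [reduceUnit] at h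
    split_ifs at h with h1 h2 h3
    · have := ih _ h; simp only [sumLen, List.map_cons, List.sum_cons] at this ⊢; omega
    · obtain ⟨cs', hcs', rfl⟩ := Option.map_eq_some_iff.1 h
      have h4 := ih _ hcs'
      have h5 := reduceClause_length_le (-l) c
      simp only [sumLen, List.map_cons, List.sum_cons] at h4 h5 ⊢; omega
    · obtain ⟨cs', hcs', rfl⟩ := Option.map_eq_some_iff.1 h
      have h4 := ih _ hcs'
      simp only [sumLen, List.map_cons, List.sum_cons] at h4 ⊢; omega

theorem reduceUnit_sumLen_lt (l : Int) (cnf cnf' : List (List Int))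
    (h : reduceUnit l cnf = some cnf') (hm : [l] ∈ cnf) : sumLen cnf' < sumLen cnf := by
  induction cnf generalizing cnf' with
  | nil => exact absurd hm (by simp)
  | cons c cs ih =>
    simp only [reduceUnit] at h
    split_ifs at h with h1 h2 h3
    · rcases List.mem_cons.1 hm with rfl | hm'
      · have := reduceUnit_sumLen_le l cs cnf' h
        simp only [sumLen, List.map_cons, List.sum_cons, List.length_singleton] at this ⊢; omega
      · have := ih _ h hm'
        simp only [sumLen, List.map_cons, List.sum_cons] at this ⊢; omega
    · have hm' : [l] ∈ cs := by
        rcases List.mem_cons.1 hm with rfl | hm'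
        · exact absurd (List.mem_singleton_self l) h1
        · exact hm'
      obtain ⟨cs', hcs', rfl⟩ := Option.map_eq_some_iff.1 h
      have h4 := ih _ hcs' hm'
      have h5 := reduceClause_length_le (-l) c
      simp only [sumLen, List.map_cons, List.sum_cons] at h4 h5 ⊢; omega
    · have hm' : [l] ∈ cs := by
        rcases List.mem_cons.1 hm with rfl | hm'
        · exact absurd (List.mem_singleton_self l) h1
        · exact hm'
      obtain ⟨cs', hcs', rfl⟩ := Option.map_eq_some_iff.1 h
      have h4 := ih _ hcs' hm'
      simp only [sumLen, List.map_cons, List.sum_cons] at h4 ⊢; omega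

-- the `while True:` unit-propagation loop; `(none, _)` = the loop hit `return False`
def unitLoop (cnf : List (List Int)) (d : PySem.Dict Int Bool) :
    Option (List (List Int)) × PySem.Dict Int Bool :=
  match hu : (cnf.filter (fun c => c.length == 1)).head? with
  | none => (some cnf, d)
  | some u =>
    let l := u.headD 0
    let d1 := d.insert |l| (decide (0 < l))
    match hr : reduceUnit l cnf with
    | none => (none, d1)
    | some cnf1 => unitLoop cnf1 d1
termination_by sumLen cnf
decreasing_by
  have hin : u ∈ cnf.filter (fun c => c.length == 1) := List.mem_of_mem_head? (by rw [hu]; simp)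
  have h2 := List.mem_filter.1 hin
  have hlen : u.length = 1 := by simpa using h2.2
  obtain ⟨a, rfl⟩ := List.length_eq_one_iff.1 hlen
  exact reduceUnit_sumLen_lt _ _ _ hr (by simpa using h2.1)


-- rewriting lemmas for the (well-founded) `unitLoop`, used by its callers' proofs
theorem unitLoop_none (cnf : List (List Int)) (d : PySem.Dict Int Bool)
    (hu : (cnf.filter (fun c => c.length == 1)).head? = none) : unitLoop cnf d = (some cnf, d) := by
  rw [unitLoop.eq_def, hu]

theorem unitLoop_some_none (cnf : List (List Int)) (d : PySem.Dict Int Bool) (u : List Int)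
    (hu : (cnf.filter (fun c => c.length == 1)).head? = some u)
    (hr : reduceUnit (u.headD 0) cnf = none) :
    unitLoop cnf d = (none, d.insert |u.headD 0| (decide (0 < u.headD 0))) := by
  rw [unitLoop.eq_def, hu]
  split
  next heq => exact absurd heq (by simp)
  next u1 heq =>
    injection heq with h1; subst h1
    dsimp only []
    split
    next => rfl
    next c1 heq2 => rw [hr] at heq2; exact absurd heq2 (by simp)

theorem unitLoop_some_some (cnf : List (List Int)) (d : PySem.Dict Int Bool) (u : List Int)
    (cnf1 : List (List Int))
    (hu : (cnf.filter (fun c => c.length == 1)).head? = some u)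
    (hr : reduceUnit (u.headD 0) cnf = some cnf1) :
    unitLoop cnf d = unitLoop cnf1 (d.insert |u.headD 0| (decide (0 < u.headD 0))) := by
  rw [unitLoop.eq_def, hu]
  split
  next heq => exact absurd heq (by simp)
  next u1 heq =>
    injection heq with h1; subst h1
    dsimp only []
    split
    next heq2 => rw [hr] at heq2; exact absurd heq2 (by simp)
    next c1 heq2 => rw [hr] at heq2; injection heq2 with h; rw [h]

-- the first unit clause found by the loop really is a one-literal clause of cnf
theorem head_filter_unit (cnf : List (List Int)) (u : List Int)
    (hu : (cnf.filter (fun c => c.length == 1)).head? = some u) :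
    u ∈ cnf ∧ u = [u.headD 0] := by
  have hin : u ∈ cnf.filter (fun c => c.length == 1) := List.mem_of_mem_head? (by rw [hu]; simp)
  have h2 := List.mem_filter.1 hin
  have hlen : u.length = 1 := by simpa using h2.2
  obtain ⟨a, ha⟩ := List.length_eq_one_iff.1 hlen
  exact ⟨h2.1, by simp [ha]⟩

-- one pass of `for c in cnf: ...` in the branching step (empty reduced clauses are kept)
def reduceBranch (b : Int) : List (List Int) → List (List Int)
  | [] => []
  | c :: cs =>
    if b ∈ c then reduceBranch b cs
    else if -b ∈ c then reduceClause (-b) c :: reduceBranch b cs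
    else c :: reduceBranch b cs

-- pure literal elimination (the `{l for c in cnf for l in c}` set is modelled in
-- first-occurrence order; the resulting cnf does not depend on the order of `pures`)
def pureElim (cnf1 : List (List Int)) (d1 : PySem.Dict Int Bool) :
    List (List Int) × PySem.Dict Int Bool :=
  let lits := PySem.List.dedup (cnf1.flatMap id)
  let pures := lits.filter (fun l => decide (-l ∉ lits))
  pures.foldl (fun p l => (p.1.filter (fun c => decide (l ∉ c)), p.2.insert |l| (decide (0 < l))))
    (cnf1, d1)

-- literal-membership lemmas used by the termination argument of `dpll`
theorem reduceUnit_lit_subset (l : Int) (cnf cnf' : List (List Int))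
    (h : reduceUnit l cnf = some cnf') :
    ∀ y ∈ cnf'.flatMap id, y ∈ cnf.flatMap id := by
  induction cnf generalizing cnf' with
  | nil =>
    simp only [reduceUnit, Option.some.injEq] at h
    subst h; simp
  | cons c cs ih =>
    simp only [reduceUnit] at h
    split_ifs at h with h1 h2 h3
    · intro y hy
      have := ih _ h y hy
      simp only [List.flatMap_cons, List.mem_append, id] at this ⊢
      exact Or.inr this
    · obtain ⟨cs', hcs', rfl⟩ := Option.map_eq_some_iff.1 h
      intro y hy
      simp only [List.flatMap_cons, List.mem_append, id] at hy ⊢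
      rcases hy with hy | hy
      · exact Or.inl ((mem_reduceClause _ _ _).1 hy).1
      · exact Or.inr (ih _ hcs' y hy)
    · obtain ⟨cs', hcs', rfl⟩ := Option.map_eq_some_iff.1 h
      intro y hy
      simp only [List.flatMap_cons, List.mem_append, id] at hy ⊢
      rcases hy with hy | hy
      · exact Or.inl hy
      · exact Or.inr (ih _ hcs' y hy)

theorem unitLoop_lit_subset_aux (n : Nat) :
    ∀ (cnf : List (List Int)) (d : PySem.Dict Int Bool) (cnf1 : List (List Int))
      (d1 : PySem.Dict Int Bool), sumLen cnf ≤ n → unitLoop cnf d = (some cnf1, d1) →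
      ∀ y ∈ cnf1.flatMap id, y ∈ cnf.flatMap id := by
  induction n with
  | zero =>
    intro cnf d cnf1 d1 hn h
    cases hu : (cnf.filter (fun c => c.length == 1)).head? with
    | none =>
      rw [unitLoop_none cnf d hu] at h
      injection h with h1 h2
      injection h1 with h1
      subst h1; exact fun y hy => hy
    | some u =>
      obtain ⟨hmem, hform⟩ := head_filter_unit cnf u hu
      cases hr : reduceUnit (u.headD 0) cnf with
      | none => rw [unitLoop_some_none cnf d u hu hr] at h; exact absurd h (by simp)
      | some c2 =>
        have hlt := reduceUnit_sumLen_lt _ _ _ hr (hform ▸ hmem)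
        omega
  | succ n ih =>
    intro cnf d cnf1 d1 hn h
    cases hu : (cnf.filter (fun c => c.length == 1)).head? with
    | none =>
      rw [unitLoop_none cnf d hu] at h
      injection h with h1 h2
      injection h1 with h1
      subst h1; exact fun y hy => hy
    | some u =>
      obtain ⟨hmem, hform⟩ := head_filter_unit cnf u hu
      cases hr : reduceUnit (u.headD 0) cnf with
      | none => rw [unitLoop_some_none cnf d u hu hr] at h; exact absurd h (by simp)
      | some c2 =>
        have hlt := reduceUnit_sumLen_lt _ _ _ hr (hform ▸ hmem)
        rw [unitLoop_some_some cnf d u c2 hu hr] at h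
        intro y hy
        exact reduceUnit_lit_subset _ _ _ hr y (ih c2 _ cnf1 d1 (by omega) h y hy)

theorem unitLoop_lit_subset (cnf : List (List Int)) (d : PySem.Dict Int Bool)
    (cnf1 : List (List Int)) (d1 : PySem.Dict Int Bool)
    (h : unitLoop cnf d = (some cnf1, d1)) :
    ∀ y ∈ cnf1.flatMap id, y ∈ cnf.flatMap id :=
  unitLoop_lit_subset_aux (sumLen cnf) cnf d cnf1 d1 (le_refl _) h

theorem foldl_pure_fst_mem (ls : List Int) :
    ∀ (p : List (List Int) × PySem.Dict Int Bool) (c : List Int),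
      c ∈ (ls.foldl (fun p l =>
        (p.1.filter (fun c => decide (l ∉ c)), p.2.insert |l| (decide (0 < l)))) p).1 →
      c ∈ p.1 := by
  induction ls with
  | nil => intro p c hc; exact hc
  | cons l ls ih =>
    intro p c hc
    have := ih _ c hc
    exact List.mem_of_mem_filter this

theorem pureElim_fst_mem (cnf1 : List (List Int)) (d1 : PySem.Dict Int Bool) :
    ∀ c ∈ (pureElim cnf1 d1).1, c ∈ cnf1 := by
  intro c hc
  exact foldl_pure_fst_mem _ _ c hc

theorem reduceBranch_lit (b : Int) (cnf : List (List Int)) :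
    ∀ y ∈ (reduceBranch b cnf).flatMap id, y ∈ cnf.flatMap id ∧ y ≠ b ∧ y ≠ -b := by
  induction cnf with
  | nil => simp [reduceBranch]
  | cons c cs ih =>
    intro y hy
    simp only [reduceBranch] at hy
    split_ifs at hy with h1 h2
    · have := ih y hy
      simp only [List.flatMap_cons, List.mem_append, id] at this ⊢
      exact ⟨Or.inr this.1, this.2⟩
    · simp only [List.flatMap_cons, List.mem_append, id] at hy ⊢
      rcases hy with hy | hy
      · have h3 := (mem_reduceClause _ _ _).1 hy
        refine ⟨Or.inl h3.1, ?_, h3.2⟩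
        rintro rfl; exact h1 h3.1
      · have := ih y hy
        exact ⟨Or.inr this.1, this.2⟩
    · simp only [List.flatMap_cons, List.mem_append, id] at hy ⊢
      rcases hy with hy | hy
      · refine ⟨Or.inl hy, ?_, ?_⟩ <;> rintro rfl
        · exact h1 hy
        · exact h2 hy
      · have := ih y hy
        exact ⟨Or.inr this.1, this.2⟩

theorem varsF_card_lt (cnf cnf1 : List (List Int)) (d : PySem.Dict Int Bool)
    (d1 : PySem.Dict Int Bool) (h : unitLoop cnf d = (some cnf1, d1))
    (hne : ¬((pureElim cnf1 d1).1 = []))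
    (hemp : ¬((pureElim cnf1 d1).1.any (fun c => c.isEmpty) = true))
    (b : Int) (hb : |b| = |(((pureElim cnf1 d1).1.headD []).headD 0)|) :
    (varsF (reduceBranch b (pureElim cnf1 d1).1)).card < (varsF cnf).card := by
  set st1 := (pureElim cnf1 d1).1 with hst
  -- literals of st1 are literals of cnf
  have hlit1 : ∀ y ∈ st1.flatMap id, y ∈ cnf.flatMap id := by
    intro y hy
    obtain ⟨c, hc, hyc⟩ := List.mem_flatMap.1 hy
    have hcc : c ∈ cnf1 := pureElim_fst_mem cnf1 d1 c hc
    exact unitLoop_lit_subset cnf d cnf1 d1 h y (List.mem_flatMap.2 ⟨c, hcc, hyc⟩)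
  -- the branching literal occurs in st1
  obtain ⟨c0, rest, hc0⟩ : ∃ c0 rest, st1 = c0 :: rest := by
    cases hc : st1 with
    | nil => exact absurd hc hne
    | cons a t => exact ⟨a, t, rfl⟩
  have hc0ne : c0 ≠ [] := by
    intro hnil
    apply hemp
    rw [hc0]
    simp [hnil]
  obtain ⟨x0, xrest, hx0⟩ : ∃ x0 xrest, c0 = x0 :: xrest := by
    cases hc : c0 with
    | nil => exact absurd hc hc0ne
    | cons a t => exact ⟨a, t, rfl⟩
  have hlitmem : ((st1.headD []).headD 0) ∈ c0 := by
    rw [hc0, hx0]; simp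
  have hlit_in : ((st1.headD []).headD 0) ∈ st1.flatMap id := by
    refine List.mem_flatMap.2 ⟨c0, ?_, hlitmem⟩
    rw [hc0]; simp
  -- |b| is a variable of cnf
  have hb_var : |b| ∈ varsF cnf := by
    unfold varsF
    rw [List.mem_toFinset]
    exact List.mem_map.2 ⟨_, hlit1 _ hlit_in, hb.symm⟩
  -- variables of the reduced cnf: inside varsF cnf, but never |b|
  have hsub : varsF (reduceBranch b st1) ⊆ varsF cnf := by
    intro x hx
    unfold varsF at hx ⊢
    rw [List.mem_toFinset] at hx ⊢
    obtain ⟨y, hy, rfl⟩ := List.mem_map.1 hx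
    exact List.mem_map.2 ⟨y, hlit1 y (reduceBranch_lit b st1 y hy).1, rfl⟩
  have hnotin : |b| ∉ varsF (reduceBranch b st1) := by
    unfold varsF
    rw [List.mem_toFinset]
    intro hx
    obtain ⟨y, hy, hyb⟩ := List.mem_map.1 hx
    obtain ⟨_, hy1, hy2⟩ := reduceBranch_lit b st1 y hy
    rcases abs_eq_abs.1 hyb with rfl | rfl
    · exact hy1 rfl
    · exact hy2 (by ring)
  exact Finset.card_lt_card ((Finset.ssubset_iff_of_subset hsub).2 ⟨|b|, hb_var, hnotin⟩)

-- transliteration of A's recursive `dpll_solver` body (the assignment dict is threaded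
-- through exactly as A writes it; A never reads it)
def dpll (cnf : List (List Int)) (d : PySem.Dict Int Bool) : Bool :=
  match h : unitLoop cnf d with
  | (none, _) => false
  | (some cnf1, d1) =>
    let st := pureElim cnf1 d1
    if st.1 = [] then true
    else if st.1.any (fun c => c.isEmpty) then false
    else
      let lit := (st.1.headD []).headD 0
      let v : Int := |lit|
      if dpll (reduceBranch v st.1) st.2 then true
      else dpll (reduceBranch (-v) st.1) st.2
termination_by (varsF cnf).card
decreasing_by
  · exact varsF_card_lt _ _ _ _ h (by assumption) (by assumption) _ (abs_abs _)
  · exact varsF_card_lt _ _ _ _ h (by assumption) (by assumption) _ (by rw [abs_neg, abs_abs])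

def dpll_solver (cnf : List (List Int)) (assignment : Option (List (Int × Bool))) : Bool :=
  -- `if assignment is None: assignment = {}`
  dpll cnf (PySem.Dict.ofList (assignment.getD []))

-- ===== PORT B =====

-- itertools.product((False, True), repeat=len(vs)), each combo zipped with vs
def allAsgs : List Int → List (List (Int × Bool))
  | [] => [[]]
  | v :: vs => (allAsgs vs).map (fun a => (v, false) :: a) ++ (allAsgs vs).map (fun a => (v, true) :: a)

-- asg[w]: first-match association-list lookup; every looked-up key is present
-- (the default branch is never reached), so this is exactly the Python dict lookup
def lookupAsg : List (Int × Bool) → Int → Bool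
  | [], _ => false
  | (k, v) :: r, x => if k = x then v else lookupAsg r x

def dpll_solver_alt (cnf : List (List Int)) (assignment : Option (List (Int × Bool))) : Bool :=
  let vars0 := PySem.List.sorted (PySem.Set.ofList ((cnf.flatMap id).map (fun l => |l|)))
    (fun x => x) false
  (allAsgs vars0).any (fun a =>
    cnf.all (fun c => c.any (fun l => lookupAsg a |l| == decide (0 < l))))

-- ===== PRECONDITION & SPEC =====
def Spec_dpll_solver (cnf : List (List Int)) (assignment : Option (List (Int × Bool))) (out : Bool) : Prop := out = dpll_solver_alt cnf assignment
instance (cnf : List (List Int)) (assignment : Option (List (Int × Bool))) (out : Bool) : Decidable (Spec_dpll_solver cnf assignment out) := by unfold Spec_dpll_solver; infer_instance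

-- ===== CLAIM (what is proved, stated in full; the proofs are below) =====
def Claim_equal_dpll_solver : Prop := ∀ (cnf : List (List Int)) (assignment : Option (List (Int × Bool))), Dom_dpll_solver cnf assignment → Spec_dpll_solver cnf assignment (dpll_solver cnf assignment)

-- ===== LEMMAS AND PROOFS =====

-- satisfaction semantics both programs are proved to decide
def ClauseSat (σ : Int → Bool) (c : List Int) : Prop := ∃ l ∈ c, σ |l| = decide (0 < l)
def Sats (σ : Int → Bool) (cnf : List (List Int)) : Prop := ∀ c ∈ cnf, ClauseSat σ c
def SatP (cnf : List (List Int)) : Prop := ∃ σ, Sats σ cnf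

theorem reduceClause_eq_nil (b : Int) (c : List Int) :
    reduceClause b c = [] ↔ ∀ x ∈ c, x = b := by
  rw [List.eq_nil_iff_forall_not_mem]
  constructor
  · intro h x hx
    by_contra hne
    exact h x ((mem_reduceClause b c x).2 ⟨hx, hne⟩)
  · intro h y hy
    have := (mem_reduceClause b c y).1 hy
    exact this.2 (h y this.1)

theorem sats_nil (σ : Int → Bool) : Sats σ [] := by intro c hc; exact absurd hc (by simp)

theorem sats_cons (σ : Int → Bool) (c : List Int) (cs : List (List Int)) :
    Sats σ (c :: cs) ↔ ClauseSat σ c ∧ Sats σ cs := by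
  constructor
  · intro h; exact ⟨h c (by simp), fun c' hc' => h c' (by simp [hc'])⟩
  · rintro ⟨h1, h2⟩ c' hc'
    rcases List.mem_cons.1 hc' with rfl | hc'
    · exact h1
    · exact h2 c' hc'

-- two assignments agreeing on all occurring variables satisfy the same cnf
theorem sats_congr (σ σ' : Int → Bool) (cnf : List (List Int))
    (h : ∀ l ∈ cnf.flatMap id, σ |l| = σ' |l|) : Sats σ cnf ↔ Sats σ' cnf := by
  have key : ∀ (τ τ' : Int → Bool), (∀ l ∈ cnf.flatMap id, τ |l| = τ' |l|) →
      Sats τ cnf → Sats τ' cnf := by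
    intro τ τ' hag hs c hc
    obtain ⟨l, hl, hsl⟩ := hs c hc
    exact ⟨l, hl, by rw [← hag l (List.mem_flatMap.2 ⟨c, hc, hl⟩)]; exact hsl⟩
  exact ⟨key σ σ' h, key σ' σ (fun l hl => (h l hl).symm)⟩

-- the two literals ±b cannot both be satisfied
theorem not_both_lits (b : Int) (hb : b ≠ 0) :
    ¬(decide (0 < b) = decide (0 < -b)) := by
  intro h
  rcases lt_trichotomy b 0 with h1 | h1 | h1 <;> simp [h1] at h <;> omega

-- an assignment satisfying literal b satisfies cnf iff it satisfies the reduct by b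
theorem sats_reduceBranch (b : Int) (σ : Int → Bool) (hσ : σ |b| = decide (0 < b)) :
    ∀ cnf : List (List Int), Sats σ cnf ↔ Sats σ (reduceBranch b cnf) := by
  intro cnf
  induction cnf with
  | nil => simp [reduceBranch]
  | cons c cs ih =>
    rw [reduceBranch]
    split_ifs with h1 h2
    · rw [sats_cons, ← ih]
      constructor
      · exact fun h => h.2
      · exact fun h => ⟨⟨b, h1, hσ⟩, h⟩
    · have hb0 : b ≠ 0 := by rintro rfl; simp at h2; exact h1 h2
      rw [sats_cons, sats_cons, ← ih]
      constructor
      · rintro ⟨⟨x, hx, hsx⟩, hrest⟩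
        refine ⟨⟨x, ?_, hsx⟩, hrest⟩
        rw [mem_reduceClause]
        refine ⟨hx, ?_⟩
        rintro rfl
        rw [abs_neg] at hsx
        exact not_both_lits b hb0 (hσ.symm.trans hsx)
      · rintro ⟨⟨x, hx, hsx⟩, hrest⟩
        exact ⟨⟨x, ((mem_reduceClause _ _ _).1 hx).1, hsx⟩, hrest⟩
    · rw [sats_cons, sats_cons, ← ih]

-- satisfiability of the reduct, characterised
theorem satP_reduceBranch (b : Int) (cnf : List (List Int)) :
    SatP (reduceBranch b cnf) ↔ ∃ σ, σ |b| = decide (0 < b) ∧ Sats σ cnf := by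
  constructor
  · rintro ⟨σ', hσ'⟩
    refine ⟨fun w => if w = |b| then decide (0 < b) else σ' w, by simp, ?_⟩
    rw [sats_reduceBranch b _ (by simp)]
    rw [sats_congr _ σ']
    · exact hσ'
    · intro l hl
      obtain ⟨_, h1, h2⟩ := reduceBranch_lit b cnf l hl
      have : |l| ≠ |b| := by
        intro hab
        rcases abs_eq_abs.1 hab with rfl | rfl
        · exact h1 rfl
        · exact h2 (by ring)
      simp [this]
  · rintro ⟨σ, hb, hs⟩
    exact ⟨σ, (sats_reduceBranch b σ hb cnf).1 hs⟩

-- a unit clause forces the value of its variable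
theorem sats_unit_force (σ : Int → Bool) (cnf : List (List Int)) (l : Int)
    (hσ : Sats σ cnf) (hm : [l] ∈ cnf) : σ |l| = decide (0 < l) := by
  obtain ⟨x, hx, hsx⟩ := hσ _ hm
  rcases List.mem_singleton.1 hx with rfl
  exact hsx

theorem reduceUnit_none_ex (l : Int) (cnf : List (List Int)) (h : reduceUnit l cnf = none) :
    ∃ c ∈ cnf, -l ∈ c ∧ l ∉ c ∧ ∀ x ∈ c, x = -l := by
  induction cnf with
  | nil => simp [reduceUnit] at h
  | cons c cs ih =>
    simp only [reduceUnit] at h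
    split_ifs at h with h1 h2 h3
    · obtain ⟨c', hc', hp⟩ := ih h
      exact ⟨c', by simp [hc'], hp⟩
    · exact ⟨c, by simp, h2, h1, (reduceClause_eq_nil _ _).1 h3⟩
    · rw [Option.map_eq_none_iff] at h
      obtain ⟨c', hc', hp⟩ := ih h
      exact ⟨c', by simp [hc'], hp⟩
    · rw [Option.map_eq_none_iff] at h
      obtain ⟨c', hc', hp⟩ := ih h
      exact ⟨c', by simp [hc'], hp⟩

theorem reduceUnit_none_unsat (l : Int) (cnf : List (List Int))
    (hm : [l] ∈ cnf) (h : reduceUnit l cnf = none) : ¬SatP cnf := by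
  rintro ⟨σ, hs⟩
  obtain ⟨c, hc, hneg, hpos, hall⟩ := reduceUnit_none_ex l cnf h
  have hb0 : l ≠ 0 := by rintro rfl; simp at hneg; exact hpos hneg
  have hf := sats_unit_force σ cnf l hs hm
  obtain ⟨x, hx, hsx⟩ := hs c hc
  rcases hall x hx
  rw [abs_neg] at hsx
  exact not_both_lits l hb0 (hf.symm.trans hsx)

theorem reduceUnit_some_eq (l : Int) (cnf cnf' : List (List Int))
    (h : reduceUnit l cnf = some cnf') : cnf' = reduceBranch l cnf := by
  induction cnf generalizing cnf' with
  | nil =>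
    simp only [reduceUnit, Option.some.injEq] at h
    subst h; rfl
  | cons c cs ih =>
    simp only [reduceUnit] at h
    rw [reduceBranch]
    split_ifs at h with h1 h2 h3
    · rw [if_pos h1]; exact ih _ h
    · obtain ⟨cs', hcs', rfl⟩ := Option.map_eq_some_iff.1 h
      rw [if_neg h1, if_pos h2, ih _ hcs']
    · obtain ⟨cs', hcs', rfl⟩ := Option.map_eq_some_iff.1 h
      rw [if_neg h1, if_neg h2, ih _ hcs']

theorem satP_unit_step (l : Int) (cnf cnf' : List (List Int))
    (hm : [l] ∈ cnf) (h : reduceUnit l cnf = some cnf') : SatP cnf ↔ SatP cnf' := by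
  rw [reduceUnit_some_eq l cnf cnf' h]
  constructor
  · rintro ⟨σ, hs⟩
    exact ⟨σ, (sats_reduceBranch l σ (sats_unit_force σ cnf l hs hm) cnf).1 hs⟩
  · intro h'
    obtain ⟨σ, _, hs⟩ := (satP_reduceBranch l cnf).1 h'
    exact ⟨σ, hs⟩

theorem unitLoop_satP_aux (n : Nat) :
    ∀ (cnf : List (List Int)) (d : PySem.Dict Int Bool) (res : Option (List (List Int)))
      (d' : PySem.Dict Int Bool), sumLen cnf ≤ n → unitLoop cnf d = (res, d') →
      (res = none → ¬SatP cnf) ∧ (∀ cnf1, res = some cnf1 → (SatP cnf ↔ SatP cnf1)) := by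
  induction n with
  | zero =>
    intro cnf d res d' hn h
    cases hu : (cnf.filter (fun c => c.length == 1)).head? with
    | none =>
      rw [unitLoop_none cnf d hu] at h
      injection h with h1 h2
      subst h1
      exact ⟨by simp, fun cnf1 he => by injection he with he; subst he; exact Iff.rfl⟩
    | some u =>
      obtain ⟨hmem, hform⟩ := head_filter_unit cnf u hu
      cases hr : reduceUnit (u.headD 0) cnf with
      | none =>
        rw [unitLoop_some_none cnf d u hu hr] at h
        injection h with h1 h2
        subst h1
        exact ⟨fun _ => reduceUnit_none_unsat _ _ (hform ▸ hmem) hr, by simp⟩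
      | some c2 =>
        have hlt := reduceUnit_sumLen_lt _ _ _ hr (hform ▸ hmem)
        omega
  | succ n ih =>
    intro cnf d res d' hn h
    cases hu : (cnf.filter (fun c => c.length == 1)).head? with
    | none =>
      rw [unitLoop_none cnf d hu] at h
      injection h with h1 h2
      subst h1
      exact ⟨by simp, fun cnf1 he => by injection he with he; subst he; exact Iff.rfl⟩
    | some u =>
      obtain ⟨hmem, hform⟩ := head_filter_unit cnf u hu
      cases hr : reduceUnit (u.headD 0) cnf with
      | none =>
        rw [unitLoop_some_none cnf d u hu hr] at h
        injection h with h1 h2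
        subst h1
        exact ⟨fun _ => reduceUnit_none_unsat _ _ (hform ▸ hmem) hr, by simp⟩
      | some c2 =>
        have hlt := reduceUnit_sumLen_lt _ _ _ hr (hform ▸ hmem)
        rw [unitLoop_some_some cnf d u c2 hu hr] at h
        have hstep := satP_unit_step _ _ _ (hform ▸ hmem) hr
        obtain ⟨r1, r2⟩ := ih c2 _ res d' (by omega) h
        refine ⟨fun he => fun hsp => r1 he (hstep.1 hsp), fun cnf1 he => (hstep.trans (r2 cnf1 he))⟩

-- pure-literal elimination preserves satisfiability
theorem satP_filter_pure (l : Int) (cnf : List (List Int)) (hp : ∀ c ∈ cnf, -l ∉ c) :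
    SatP cnf ↔ SatP (cnf.filter (fun c => decide (l ∉ c))) := by
  constructor
  · rintro ⟨σ, hs⟩
    exact ⟨σ, fun c hc => hs c (List.mem_of_mem_filter hc)⟩
  · rintro ⟨σ', hs'⟩
    refine ⟨fun w => if w = |l| then decide (0 < l) else σ' w, ?_⟩
    intro c hc
    by_cases hl : l ∈ c
    · exact ⟨l, hl, by simp⟩
    · have hck : c ∈ cnf.filter (fun c => decide (l ∉ c)) := List.mem_filter.2 ⟨hc, by simpa⟩
      obtain ⟨x, hx, hsx⟩ := hs' c hck
      refine ⟨x, hx, ?_⟩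
      have hxl : x ≠ l := fun he => hl (he ▸ hx)
      have hxnl : x ≠ -l := fun he => hp c hc (he ▸ hx)
      have : |x| ≠ |l| := by
        intro hab
        rcases abs_eq_abs.1 hab with rfl | rfl
        · exact hxl rfl
        · exact hxnl rfl
      simpa [this] using hsx

theorem foldl_pure_satP (cnf1 : List (List Int)) (ls : List Int) :
    ∀ (cur : List (List Int)) (d : PySem.Dict Int Bool),
      (∀ c ∈ cur, c ∈ cnf1) → (∀ l ∈ ls, ∀ c ∈ cnf1, -l ∉ c) →
      (SatP cur ↔ SatP (ls.foldl (fun p l =>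
        (p.1.filter (fun c => decide (l ∉ c)), p.2.insert |l| (decide (0 < l)))) (cur, d)).1) := by
  induction ls with
  | nil => intro cur d _ _; exact Iff.rfl
  | cons l ls ih =>
    intro cur d hsub hpure
    have hp : ∀ c ∈ cur, -l ∉ c := fun c hc => hpure l (by simp) c (hsub c hc)
    have hstep := satP_filter_pure l cur hp
    rw [List.foldl_cons]
    refine hstep.trans (ih _ _ ?_ ?_)
    · exact fun c hc => hsub c (List.mem_of_mem_filter hc)
    · exact fun l' hl' => hpure l' (by simp [hl'])

theorem pureElim_satP (cnf1 : List (List Int)) (d1 : PySem.Dict Int Bool) :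
    SatP cnf1 ↔ SatP (pureElim cnf1 d1).1 := by
  unfold pureElim
  refine foldl_pure_satP cnf1 _ cnf1 d1 (fun c hc => hc) ?_
  intro l hl c hc hmem
  have h2 := List.mem_filter.1 hl
  have : -l ∈ PySem.List.dedup (cnf1.flatMap id) :=
    (PySem.List.mem_dedup _ _).2 (List.mem_flatMap.2 ⟨c, hc, hmem⟩)
  have h3 := h2.2
  simp only [decide_eq_true_eq] at h3
  exact h3 this

-- rewriting lemmas for the (well-founded) `dpll`
theorem dpll_none (cnf : List (List Int)) (d dx : PySem.Dict Int Bool)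
    (h : unitLoop cnf d = (none, dx)) : dpll cnf d = false := by
  rw [dpll.eq_def]
  split
  next heq => rfl
  next cnf1 d1 heq => rw [h] at heq; injection heq with h1 h2; exact absurd h1 (by simp)

theorem dpll_some (cnf cnf1 : List (List Int)) (d d1 : PySem.Dict Int Bool)
    (h : unitLoop cnf d = (some cnf1, d1)) :
    dpll cnf d =
      (if (pureElim cnf1 d1).1 = [] then true
       else if (pureElim cnf1 d1).1.any (fun c => c.isEmpty) then false
       else if dpll (reduceBranch |(((pureElim cnf1 d1).1.headD []).headD 0)| (pureElim cnf1 d1).1)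
           (pureElim cnf1 d1).2 then true
       else dpll (reduceBranch (-|(((pureElim cnf1 d1).1.headD []).headD 0)|) (pureElim cnf1 d1).1)
           (pureElim cnf1 d1).2) := by
  rw [dpll.eq_def]
  split
  next heq => rw [h] at heq; exact absurd heq (by simp)
  next cnf1' d1' heq =>
    rw [h] at heq
    injection heq with h1 h2
    injection h1 with h1
    subst h1; subst h2
    rfl

-- the branching dichotomy (v is a nonnegative branching variable)
theorem satP_branch (v : Int) (hv : 0 ≤ v) (cnf : List (List Int)) :
    SatP cnf ↔ SatP (reduceBranch v cnf) ∨ SatP (reduceBranch (-v) cnf) := by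
  rw [satP_reduceBranch, satP_reduceBranch]
  constructor
  · rintro ⟨σ, hs⟩
    rcases eq_or_lt_of_le hv with rfl | hpos
    · left
      refine ⟨fun w => if w = 0 then false else σ w, by simp, ?_⟩
      intro c hc
      by_cases h0 : (0 : Int) ∈ c
      · exact ⟨0, h0, by simp⟩
      · obtain ⟨x, hx, hsx⟩ := hs c hc
        have hx0 : x ≠ 0 := fun he => h0 (he ▸ hx)
        have : |x| ≠ 0 := by simpa using hx0
        exact ⟨x, hx, by simpa [this] using hsx⟩
    · cases hσv : σ v with
      | true =>
        left
        exact ⟨σ, by rw [abs_of_pos hpos, hσv]; simp [hpos], hs⟩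
      | false =>
        right
        refine ⟨σ, ?_, hs⟩
        rw [abs_neg, abs_of_pos hpos, hσv]
        simp; omega
  · rintro (⟨σ, _, hs⟩ | ⟨σ, _, hs⟩) <;> exact ⟨σ, hs⟩

theorem satP_empty_clause (cnf : List (List Int)) (h : [] ∈ cnf) : ¬SatP cnf := by
  rintro ⟨σ, hs⟩
  obtain ⟨x, hx, _⟩ := hs [] h
  exact absurd hx (by simp)

theorem dpll_eq_satP_case (cnf : List (List Int)) (d : PySem.Dict Int Bool)
    (hrec : ∀ (cnf' : List (List Int)) (d' : PySem.Dict Int Bool),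
      (varsF cnf').card < (varsF cnf).card → (dpll cnf' d' = true ↔ SatP cnf')) :
    dpll cnf d = true ↔ SatP cnf := by
  rcases h : unitLoop cnf d with ⟨res, d'⟩
  cases res with
  | none =>
    rw [dpll_none cnf d d' h]
    simp only [Bool.false_eq_true, false_iff]
    exact (unitLoop_satP_aux (sumLen cnf) cnf d none d' (le_refl _) h).1 rfl
  | some cnf1 =>
    have hiff1 : SatP cnf ↔ SatP cnf1 :=
      (unitLoop_satP_aux (sumLen cnf) cnf d (some cnf1) d' (le_refl _) h).2 cnf1 rfl
    have hiff2 : SatP cnf1 ↔ SatP (pureElim cnf1 d').1 := pureElim_satP cnf1 d'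
    rw [dpll_some cnf cnf1 d d' h]
    split_ifs with he1 he2 he3
    · simp only [true_iff]
      rw [hiff1, hiff2, he1]
      exact ⟨fun _ => true, sats_nil _⟩
    · simp only [false_iff]
      rw [hiff1, hiff2]
      obtain ⟨c, hc, hcE⟩ := List.any_eq_true.1 he2
      have : c = [] := by simpa using hcE
      exact satP_empty_clause _ (this ▸ hc)
    · have hc1 : (varsF (reduceBranch |(((pureElim cnf1 d').1.headD []).headD 0)|
          (pureElim cnf1 d').1)).card < (varsF cnf).card :=
        varsF_card_lt cnf cnf1 d d' h he1 he2 _ (abs_abs _)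
      have ihA := hrec _ (pureElim cnf1 d').2 hc1
      simp only [true_iff]
      rw [hiff1, hiff2, satP_branch |(((pureElim cnf1 d').1.headD []).headD 0)| (abs_nonneg _)
        (pureElim cnf1 d').1]
      exact Or.inl (ihA.1 he3)
    · have hc1 : (varsF (reduceBranch |(((pureElim cnf1 d').1.headD []).headD 0)|
          (pureElim cnf1 d').1)).card < (varsF cnf).card :=
        varsF_card_lt cnf cnf1 d d' h he1 he2 _ (abs_abs _)
      have hc2 : (varsF (reduceBranch (-|(((pureElim cnf1 d').1.headD []).headD 0)|)
          (pureElim cnf1 d').1)).card < (varsF cnf).card :=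
        varsF_card_lt cnf cnf1 d d' h he1 he2 _ (by rw [abs_neg, abs_abs])
      have ihA := hrec _ (pureElim cnf1 d').2 hc1
      have ihB := hrec _ (pureElim cnf1 d').2 hc2
      rw [hiff1, hiff2, satP_branch |(((pureElim cnf1 d').1.headD []).headD 0)| (abs_nonneg _)
        (pureElim cnf1 d').1, ihB]
      constructor
      · exact Or.inr
      · rintro (hsa | hsb)
        · exact absurd (ihA.2 hsa) he3
        · exact hsb

theorem dpll_eq_satP_aux (n : Nat) :
    ∀ (cnf : List (List Int)) (d : PySem.Dict Int Bool), (varsF cnf).card ≤ n →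
      (dpll cnf d = true ↔ SatP cnf) := by
  induction n with
  | zero =>
    intro cnf d hn
    exact dpll_eq_satP_case cnf d (fun _ _ h => absurd h (by omega))
  | succ n ih =>
    intro cnf d hn
    exact dpll_eq_satP_case cnf d (fun cnf' d' h => ih cnf' d' (by omega))

theorem dpll_eq_satP (cnf : List (List Int)) (d : PySem.Dict Int Bool) :
    dpll cnf d = true ↔ SatP cnf :=
  dpll_eq_satP_aux (varsF cnf).card cnf d (le_refl _)

-- ===== B-side lemmas =====

theorem mem_allAsgs_map (σ : Int → Bool) (vs : List Int) :
    vs.map (fun v => (v, σ v)) ∈ allAsgs vs := by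
  induction vs with
  | nil => simp [allAsgs]
  | cons v vs ih =>
    rw [List.map_cons, allAsgs]
    cases hv : σ v with
    | false => exact List.mem_append_left _ (List.mem_map.2 ⟨_, ih, rfl⟩)
    | true => exact List.mem_append_right _ (List.mem_map.2 ⟨_, ih, rfl⟩)

theorem lookup_map (σ : Int → Bool) (vs : List Int) (w : Int) (hw : w ∈ vs) :
    lookupAsg (vs.map (fun v => (v, σ v))) w = σ w := by
  induction vs with
  | nil => exact absurd hw (by simp)
  | cons v vs ih =>
    rw [List.map_cons, lookupAsg]
    by_cases hv : v = w
    · subst hv; simp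
    · rw [if_neg hv]
      exact ih (by rcases List.mem_cons.1 hw with rfl | h; exact absurd rfl hv; exact h)

theorem alt_eq_satP (cnf : List (List Int)) (assignment : Option (List (Int × Bool))) :
    dpll_solver_alt cnf assignment = true ↔ SatP cnf := by
  unfold dpll_solver_alt
  rw [List.any_eq_true]
  constructor
  · rintro ⟨a, _, hall⟩
    refine ⟨fun w => lookupAsg a w, ?_⟩
    intro c hc
    rw [List.all_eq_true] at hall
    obtain ⟨l, hl, hbeq⟩ := List.any_eq_true.1 (hall c hc)
    exact ⟨l, hl, by simpa using hbeq⟩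
  · rintro ⟨σ, hs⟩
    set vs := PySem.List.sorted (PySem.Set.ofList ((cnf.flatMap id).map (fun l => |l|)))
        (fun x => x) false with hvs
    have hcover : ∀ l, l ∈ cnf.flatMap id → |l| ∈ vs := by
      intro l hl
      rw [hvs, PySem.List.mem_sorted]
      rw [← PySem.List.dedup_eq_ofList, PySem.List.mem_dedup]
      exact List.mem_map.2 ⟨l, hl, rfl⟩
    refine ⟨vs.map (fun v => (v, σ v)), mem_allAsgs_map σ vs, ?_⟩
    rw [List.all_eq_true]
    intro c hc
    obtain ⟨l, hl, hsl⟩ := hs c hc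
    refine List.any_eq_true.2 ⟨l, hl, ?_⟩
    rw [lookup_map σ vs |l| (hcover l (List.mem_flatMap.2 ⟨c, hc, hl⟩))]
    simp [hsl]

-- ===== VERDICT (by name: the statement is the Claim_ definition above) =====
theorem dpll_solver_spec : Claim_equal_dpll_solver := by
  intro cnf assignment _
  unfold Spec_dpll_solver dpll_solver
  rw [Bool.eq_iff_iff, dpll_eq_satP, alt_eq_satP]
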